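-- pv_equiv track=rewrite | github.com/bobdadada/smalltools | convert_num2zhchar.py | csplit
-- ===== SOURCE A (Python) =====
-- def csplit(cdata):  # 拆分函数，将整数字符串拆分成[亿，万，仟]的list
--     g = len(cdata) % 4
--     csdata = []
--     lx = len(cdata) - 1
--     if g > 0:
--         csdata.append(cdata[0:g])
--     k = g
--     while k <= lx:
--         csdata.append(cdata[k:k + 4])
--         k += 4
--     return csdata
-- ===== SOURCE B (Python) =====
-- def csplit(cdata):
--     # Right-aligned grouping: reverse, chunk uniformly into fours, restore order.
--     groups = []
--     rest = cdata[::-1]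
--     while rest:
--         groups.append(rest[:4][::-1])
--         rest = rest[4:]
--     groups.reverse()
--     return groups
-- ===== Notes on version B (the rewrite author's own statement) =====
-- stated objective: alternative
-- what changed: B replaces A's remainder-then-left-to-right scan with the standard right-aligned grouping idiom: reverse the string, chunk it uniformly into fours with no remainder special case, re-reverse each chunk and the list of groups.
import Mathlib
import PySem

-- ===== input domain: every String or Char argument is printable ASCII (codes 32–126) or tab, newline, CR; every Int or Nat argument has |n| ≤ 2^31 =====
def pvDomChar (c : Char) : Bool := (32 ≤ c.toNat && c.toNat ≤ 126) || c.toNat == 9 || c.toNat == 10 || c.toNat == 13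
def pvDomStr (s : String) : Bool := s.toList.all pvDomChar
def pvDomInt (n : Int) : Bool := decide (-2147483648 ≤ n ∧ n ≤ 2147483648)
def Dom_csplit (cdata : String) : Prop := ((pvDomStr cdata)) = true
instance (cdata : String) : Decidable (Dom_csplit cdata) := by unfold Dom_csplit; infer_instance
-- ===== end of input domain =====

-- B replaces A's remainder-then-left-scan grouping with the standard right-aligned idiom
-- (reverse, chunk uniformly into fours, restore order); objective: alternative decomposition, same cost.

-- ===== PORT A =====
-- the 'while k <= lx' loop of A; acc is csdata
def csplitLoopA (cs : List Char) (lx k : Int) (acc : List String) : List String :=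
  if k ≤ lx then
    csplitLoopA cs lx (k + 4) (acc ++ [String.ofList (PySem.List.slice cs (some k) (some (k + 4)))])
  else acc
termination_by (lx + 1 - k).toNat
decreasing_by omega

def csplit (cdata : String) : List String :=
  let cs := cdata.toList
  let g : Int := PySem.Int.mod (cs.length : Int) 4
  let lx : Int := (cs.length : Int) - 1
  let csdata : List String :=
    if g > 0 then [String.ofList (PySem.List.slice cs (some 0) (some g))] else []
  csplitLoopA cs lx g csdata

-- ===== PORT B =====
-- the 'while rest' loop of B; rest[:4] = take 4 and rest[4:] = drop 4 (exact for these
-- nonnegative literal bounds, PySem.List.slice_to/slice_from), s[::-1] = reverse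
-- (PySem.List.slice?_none_none_neg_one)
def chunkRevB (rest : List Char) (groups : List String) : List String :=
  if rest.isEmpty then groups
  else chunkRevB (rest.drop 4) (groups ++ [String.ofList (rest.take 4).reverse])
termination_by rest.length
decreasing_by
  rename_i h
  simp [List.isEmpty_iff] at h
  have : rest.length ≠ 0 := by simpa [List.length_eq_zero_iff] using h
  simp; omega

def csplit_alt (cdata : String) : List String :=
  (chunkRevB cdata.toList.reverse []).reverse

-- ===== PRECONDITION & SPEC =====
def Spec_csplit (cdata : String) (out : List String) : Prop := out = csplit_alt cdata
instance (cdata : String) (out : List String) : Decidable (Spec_csplit cdata out) := by unfold Spec_csplit; infer_instance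

-- ===== CLAIM (what is proved, stated in full; the proofs are below) =====
def Claim_equal_csplit : Prop := ∀ (cdata : String), Dom_csplit cdata → Spec_csplit cdata (csplit cdata)

-- ===== LEMMAS AND PROOFS =====

-- left-to-right chunks of four (what A's loop produces)
def lcs (l : List Char) : List (List Char) :=
  if l.isEmpty then [] else l.take 4 :: lcs (l.drop 4)
termination_by l.length
decreasing_by
  rename_i h
  simp [List.isEmpty_iff] at h
  have : l.length ≠ 0 := by simpa [List.length_eq_zero_iff] using h
  simp; omega

-- chunks of four of the reversed input, each chunk re-reversed (what B's loop produces)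
def rcs (l : List Char) : List (List Char) :=
  if l.isEmpty then [] else (l.take 4).reverse :: rcs (l.drop 4)
termination_by l.length
decreasing_by
  rename_i h
  simp [List.isEmpty_iff] at h
  have : l.length ≠ 0 := by simpa [List.length_eq_zero_iff] using h
  simp; omega

-- A's value, on the char-list side
def aform (l : List Char) : List (List Char) :=
  (if l.length % 4 > 0 then [l.take (l.length % 4)] else []) ++ lcs (l.drop (l.length % 4))

lemma chunkRevB_eq (rest : List Char) (groups : List String) :
    chunkRevB rest groups = groups ++ (rcs rest).map String.ofList := by
  fun_induction chunkRevB with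
  | case1 rest groups h => simp [rcs, h]
  | case2 rest groups h ih => rw [rcs, if_neg h]; simp [ih]

lemma loopA_eq (cs : List Char) (k : Nat) (acc : List String) :
    csplitLoopA cs ((cs.length : Int) - 1) (k : Int) acc
      = acc ++ (lcs (cs.drop k)).map String.ofList := by
  have hm : ∀ m (k : Nat) (acc : List String), cs.length - k ≤ m →
      csplitLoopA cs ((cs.length : Int) - 1) (k : Int) acc
        = acc ++ (lcs (cs.drop k)).map String.ofList := by
    intro m
    induction m with
    | zero =>
      intro k acc hk
      rw [csplitLoopA, if_neg (by omega)]
      have : cs.drop k = [] := by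
        rw [List.drop_eq_nil_iff]; omega
      simp [this, lcs]
    | succ m ih =>
      intro k acc hk
      by_cases hlt : k < cs.length
      · rw [csplitLoopA, if_pos (by omega)]
        have hslice : PySem.List.slice cs (some (k : Int)) (some ((k : Int) + 4))
            = (cs.drop k).take 4 := by
          have := PySem.List.slice_natCast_add (xs := cs) (j := k) (n := 4)
          simpa using this
        have hrec : ((k : Int) + 4) = ((k + 4 : Nat) : Int) := by push_cast; ring
        rw [hslice, hrec, ih (k + 4) _ (by omega)]
        have hl : lcs (cs.drop k) = (cs.drop k).take 4 :: lcs (cs.drop (k + 4)) := by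
          rw [lcs, if_neg (by simp only [List.isEmpty_iff, List.drop_eq_nil_iff]; omega)]
          rw [List.drop_drop]
        simp [hl]
      · rw [csplitLoopA, if_neg (by omega)]
        have : cs.drop k = [] := by rw [List.drop_eq_nil_iff]; omega
        simp [this, lcs]
  exact hm (cs.length - k) k acc (le_refl _)

lemma csplit_eq_aform (cdata : String) :
    csplit cdata = (aform cdata.toList).map String.ofList := by
  set cs := cdata.toList with hcs
  have hg : PySem.Int.mod (cs.length : Int) 4 = ((cs.length % 4 : Nat) : Int) := by
    exact_mod_cast PySem.Int.mod_natCast cs.length 4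
  show csplitLoopA cs ((cs.length : Int) - 1) (PySem.Int.mod (cs.length : Int) 4)
      (if PySem.Int.mod (cs.length : Int) 4 > 0 then
        [String.ofList (PySem.List.slice cs (some 0) (some (PySem.Int.mod (cs.length : Int) 4)))]
       else []) = (aform cs).map String.ofList
  rw [hg, loopA_eq cs (cs.length % 4)]
  unfold aform
  by_cases h : cs.length % 4 > 0
  · rw [if_pos (by exact_mod_cast h), if_pos h]
    rw [PySem.List.slice_zero_start, PySem.List.slice_to_natCast]
    simp
  · rw [if_neg (by omega), if_neg h]
    simp

lemma csplit_alt_eq (cdata : String) :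
    csplit_alt cdata = ((rcs cdata.toList.reverse).reverse).map String.ofList := by
  unfold csplit_alt
  rw [chunkRevB_eq]
  simp

-- the single right-aligned grouping step both forms satisfy
lemma lcs_step (l : List Char) (h4 : l.length % 4 = 0) (hne : l ≠ []) :
    lcs l = lcs (l.take (l.length - 4)) ++ [l.drop (l.length - 4)] := by
  have hm : ∀ m (l : List Char), l.length ≤ m → l.length % 4 = 0 → l ≠ [] →
      lcs l = lcs (l.take (l.length - 4)) ++ [l.drop (l.length - 4)] := by
    intro m
    induction m with
    | zero =>
      intro l hl h4 hne
      exact absurd (List.length_eq_zero_iff.mp (by omega)) hne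
    | succ m ih =>
      intro l hl h4 hne
      have hpos : 0 < l.length := List.length_pos_iff.mpr hne
      rw [lcs, if_neg (by simpa [List.isEmpty_iff] using hne)]
      by_cases hle : l.length ≤ 4
      · have h4' : l.length = 4 := by omega
        have hd : l.drop 4 = [] := by rw [List.drop_eq_nil_iff]; omega
        have ht : l.take 4 = l := List.take_of_length_le (by omega)
        have h0 : l.length - 4 = 0 := by omega
        rw [hd, ht, h0]
        simp [lcs]
      · have hlen8 : 8 ≤ l.length := by omega
        have ihd := ih (l.drop 4) (by rw [List.length_drop]; omega)
          (by rw [List.length_drop]; omega)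
          (by rw [Ne, List.drop_eq_nil_iff]; omega)
        rw [ihd]
        have e1 : (l.drop 4).take ((l.drop 4).length - 4) = (l.take (l.length - 4)).drop 4 := by
          simp only [List.length_drop]
          rw [List.take_drop]
          have h48 : 4 + (l.length - 4 - 4) = l.length - 4 := by omega
          rw [h48]
        have e2 : (l.drop 4).drop ((l.drop 4).length - 4) = l.drop (l.length - 4) := by
          rw [List.drop_drop]
          congr 1
          rw [List.length_drop]; omega
        rw [e1, e2]
        have hstep : lcs (l.take (l.length - 4))
            = (l.take (l.length - 4)).take 4 :: lcs ((l.take (l.length - 4)).drop 4) := by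
          rw [lcs, if_neg (by simp only [List.isEmpty_iff, List.take_eq_nil_iff, not_or]; exact ⟨by omega, hne⟩)]
        rw [hstep, List.take_take, min_eq_left (by omega)]
        simp
  exact hm l.length l (le_refl _) h4 hne

lemma aform_nil : aform [] = [] := by
  unfold aform
  rw [lcs]
  simp

lemma aform_small (l : List Char) (hne : l ≠ []) (hle : l.length ≤ 4) : aform l = [l] := by
  have hpos : 0 < l.length := List.length_pos_iff.mpr hne
  unfold aform
  by_cases h4 : l.length % 4 > 0
  · have hlt : l.length < 4 := by omega
    have hg : l.length % 4 = l.length := Nat.mod_eq_of_lt hlt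
    rw [if_pos h4, hg, List.take_length, List.drop_length]
    rw [lcs]
    simp
  · have h0 : l.length % 4 = 0 := by omega
    have h4' : l.length = 4 := by omega
    rw [if_neg h4, h0, List.drop_zero, List.nil_append]
    rw [lcs, if_neg (by simpa [List.isEmpty_iff] using hne)]
    have ht : l.take 4 = l := List.take_of_length_le (by omega)
    have hd : l.drop 4 = [] := by rw [List.drop_eq_nil_iff]; omega
    rw [ht, hd, lcs]
    simp

lemma aform_step (l : List Char) (hne : l ≠ []) :
    aform l = aform (l.take (l.length - 4)) ++ [l.drop (l.length - 4)] := by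
  have hpos : 0 < l.length := List.length_pos_iff.mpr hne
  by_cases hle : l.length ≤ 4
  · have h0 : l.length - 4 = 0 := by omega
    rw [h0, List.take_zero, List.drop_zero, aform_nil, aform_small l hne hle]
    simp
  · have hmod : (l.take (l.length - 4)).length = l.length - 4 := by
      rw [List.length_take]; omega
    have hg4 : (l.length - 4) % 4 = l.length % 4 := by omega
    unfold aform
    rw [hmod, hg4]
    set g := l.length % 4 with hg
    have hglt : g < 4 := Nat.mod_lt _ (by omega)
    have hgle : g ≤ l.length - 4 := by omega
    have e0 : (l.take (l.length - 4)).take g = l.take g := by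
      rw [List.take_take, min_eq_left (by omega)]
    rw [e0, List.append_assoc]
    congr 1
    have hstep := lcs_step (l.drop g) (by rw [List.length_drop]; omega)
      (by rw [Ne, List.drop_eq_nil_iff]; omega)
    rw [hstep]
    have e1 : (l.drop g).take ((l.drop g).length - 4) = (l.take (l.length - 4)).drop g := by
      simp only [List.length_drop]
      rw [List.take_drop]
      have hgg : g + (l.length - g - 4) = l.length - 4 := by omega
      rw [hgg]
    have e2 : (l.drop g).drop ((l.drop g).length - 4) = l.drop (l.length - 4) := by
      rw [List.drop_drop]
      congr 1
      rw [List.length_drop]; omega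
    rw [e1, e2]

lemma bform_step (l : List Char) (hne : l ≠ []) :
    (rcs l.reverse).reverse
      = (rcs (l.take (l.length - 4)).reverse).reverse ++ [l.drop (l.length - 4)] := by
  have hrev : l.reverse ≠ [] := by simpa using hne
  rw [rcs, if_neg (by simpa [List.isEmpty_iff] using hrev)]
  rw [List.take_reverse, List.drop_reverse]
  simp

lemma aform_eq_bform (l : List Char) : aform l = (rcs l.reverse).reverse := by
  have hm : ∀ m (l : List Char), l.length ≤ m → aform l = (rcs l.reverse).reverse := by
    intro m
    induction m with
    | zero =>
      intro l hl
      have : l = [] := List.length_eq_zero_iff.mp (by omega)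
      subst this
      simp [aform, lcs, rcs]
    | succ m ih =>
      intro l hl
      by_cases hne : l = []
      · subst hne; simp [aform, lcs, rcs]
      · have hpos : 0 < l.length := List.length_pos_iff.mpr hne
        rw [aform_step l hne, bform_step l hne,
          ih (l.take (l.length - 4)) (by simp; omega)]
  exact hm l.length l (le_refl _)

-- ===== VERDICT (by name: the statement is the Claim_ definition above) =====
theorem csplit_spec : Claim_equal_csplit := by
  intro cdata _
  unfold Spec_csplit
  rw [csplit_eq_aform, csplit_alt_eq, aform_eq_bform]
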